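-- pv_equiv track=rewrite | github.com/ytihianine/airflow_refacto | dags/sg/siep/mmsi/consommation_batiment/process.py | determiner_statut_fluide_global
-- ===== SOURCE A (Python) =====
-- from enum import Enum
--
-- class Statuts(str, Enum):
--     debut_exp = "DEBUT EXP"
--     fin_exp = "FIN EXP"
--     incomplet = "INCOMPLET"
--     complet = "COMPLET"
--
-- def determiner_statut_fluide_global(
--     statut_elec: str,
--     statut_gaz: str,
--     statut_reseau_chaud: str,
--     statut_reseau_froid: str,
-- ) -> str:
--     lst_statut_par_fluide = [statut_gaz, statut_reseau_chaud, statut_reseau_froid]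
--
--     if statut_elec == Statuts.complet.value and all(
--         element is None or element == Statuts.complet.value
--         for element in lst_statut_par_fluide
--     ):
--         return Statuts.complet.value
--
--     if statut_elec == Statuts.debut_exp.value and all(
--         element is None or element == Statuts.debut_exp.value
--         for element in lst_statut_par_fluide
--     ):
--         return Statuts.debut_exp.value
--
--     if statut_elec == Statuts.fin_exp.value and all(
--         element is None or element == Statuts.fin_exp.value
--         for element in lst_statut_par_fluide
--     ):
--         return Statuts.fin_exp.value
--
--     return Statuts.incomplet.value
-- ===== SOURCE B (Python) =====
-- def determiner_statut_fluide_global(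
--     statut_elec: str,
--     statut_gaz: str,
--     statut_reseau_chaud: str,
--     statut_reseau_froid: str,
-- ) -> str:
--     # Collect all distinct statuses actually present (None means "no such fluid").
--     statuts = {statut_elec}
--     for s in (statut_gaz, statut_reseau_chaud, statut_reseau_froid):
--         if s is not None:
--             statuts.add(s)
--     # Global status is uniform iff only one distinct status occurs and it is a known one.
--     if statuts == {statut_elec} and statut_elec in ("COMPLET", "DEBUT EXP", "FIN EXP"):
--         return statut_elec
--     return "INCOMPLET"
-- ===== Notes on version B (the rewrite author's own statement) =====
-- stated objective: simpler
-- what changed: Instead of testing each of the three candidate statuses with its own all-None-or-equal scan, B builds the set of distinct statuses present once and returns statut_elec iff that set is the singleton {statut_elec} and statut_elec is a known status.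
import Mathlib
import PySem

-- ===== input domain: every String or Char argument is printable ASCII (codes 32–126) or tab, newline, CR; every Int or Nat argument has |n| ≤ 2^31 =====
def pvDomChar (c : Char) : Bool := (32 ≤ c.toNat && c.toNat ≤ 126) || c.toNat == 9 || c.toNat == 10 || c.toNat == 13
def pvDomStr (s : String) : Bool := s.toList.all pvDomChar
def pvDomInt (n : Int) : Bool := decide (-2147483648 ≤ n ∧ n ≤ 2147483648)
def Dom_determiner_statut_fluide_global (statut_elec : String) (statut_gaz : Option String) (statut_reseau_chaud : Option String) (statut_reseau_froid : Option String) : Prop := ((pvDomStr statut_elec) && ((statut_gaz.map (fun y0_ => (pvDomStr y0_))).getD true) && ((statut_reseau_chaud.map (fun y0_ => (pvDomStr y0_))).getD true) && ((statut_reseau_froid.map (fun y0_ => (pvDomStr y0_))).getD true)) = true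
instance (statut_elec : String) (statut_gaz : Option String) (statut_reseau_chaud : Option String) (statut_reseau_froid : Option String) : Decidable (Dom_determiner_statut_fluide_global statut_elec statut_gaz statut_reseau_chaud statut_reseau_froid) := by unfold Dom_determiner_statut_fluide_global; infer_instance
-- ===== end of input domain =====

-- B replaces A's three per-candidate scans by building the set of distinct statuses present
-- once and testing it against the singleton {statut_elec} (objective: simpler).

-- ===== PORT A =====
-- A: three sequential if-blocks, each testing statut_elec against one status and
-- `all(element is None or element == <status> for element in lst_statut_par_fluide)`.
def determiner_statut_fluide_global (statut_elec : String) (statut_gaz : Option String) (statut_reseau_chaud : Option String) (statut_reseau_froid : Option String) : String :=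
  let lst_statut_par_fluide := [statut_gaz, statut_reseau_chaud, statut_reseau_froid]
  if statut_elec == "COMPLET" &&
      lst_statut_par_fluide.all (fun element => element == none || element == some "COMPLET") then
    "COMPLET"
  else if statut_elec == "DEBUT EXP" &&
      lst_statut_par_fluide.all (fun element => element == none || element == some "DEBUT EXP") then
    "DEBUT EXP"
  else if statut_elec == "FIN EXP" &&
      lst_statut_par_fluide.all (fun element => element == none || element == some "FIN EXP") then
    "FIN EXP"
  else
    "INCOMPLET"

-- ===== PORT B =====
-- B: build the Python set {statut_elec} extended with every non-None fluid status,
-- then return statut_elec iff the set stayed {statut_elec} and statut_elec is a known status.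
def determiner_statut_fluide_global_alt (statut_elec : String) (statut_gaz : Option String) (statut_reseau_chaud : Option String) (statut_reseau_froid : Option String) : String :=
  let statuts : PySem.Set String :=
    ([statut_gaz, statut_reseau_chaud, statut_reseau_froid] : List (Option String)).foldl
      (fun s o => match o with
        | some v => PySem.Set.add s v
        | none => s)
      (PySem.Set.ofList [statut_elec])
  if PySem.Set.equal statuts (PySem.Set.ofList [statut_elec]) &&
      ["COMPLET", "DEBUT EXP", "FIN EXP"].contains statut_elec then
    statut_elec
  else
    "INCOMPLET"

-- ===== PRECONDITION & SPEC =====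
def Spec_determiner_statut_fluide_global (statut_elec : String) (statut_gaz : Option String) (statut_reseau_chaud : Option String) (statut_reseau_froid : Option String) (out : String) : Prop := out = determiner_statut_fluide_global_alt statut_elec statut_gaz statut_reseau_chaud statut_reseau_froid
instance (statut_elec : String) (statut_gaz : Option String) (statut_reseau_chaud : Option String) (statut_reseau_froid : Option String) (out : String) : Decidable (Spec_determiner_statut_fluide_global statut_elec statut_gaz statut_reseau_chaud statut_reseau_froid out) := by unfold Spec_determiner_statut_fluide_global; infer_instance

-- ===== CLAIM =====
def Claim_equal_determiner_statut_fluide_global : Prop := ∀ (statut_elec : String) (statut_gaz : Option String) (statut_reseau_chaud : Option String) (statut_reseau_froid : Option String), Dom_determiner_statut_fluide_global statut_elec statut_gaz statut_reseau_chaud statut_reseau_froid → Spec_determiner_statut_fluide_global statut_elec statut_gaz statut_reseau_chaud statut_reseau_froid (determiner_statut_fluide_global statut_elec statut_gaz statut_reseau_chaud statut_reseau_froid)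

-- ===== LEMMAS AND PROOFS =====

-- B's set test succeeds iff every non-None fluid status equals statut_elec.
lemma pvSetEq_iff (e : String) (l : List (Option String)) :
    PySem.Set.equal
      (l.foldl (fun s o => match o with
        | some v => PySem.Set.add s v
        | none => s) (PySem.Set.ofList [e]))
      (PySem.Set.ofList [e]) = true ↔
    ∀ o ∈ l, o = none ∨ o = some e := by
  have hmem : ∀ (l : List (Option String)) (s : PySem.Set String) (x : String),
      x ∈ l.foldl (fun s o => match o with
        | some v => PySem.Set.add s v
        | none => s) s ↔ x ∈ s ∨ some x ∈ l := by
    intro l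
    induction l with
    | nil => simp
    | cons o t ih =>
      intro s x
      cases o with
      | none => simp [List.foldl, ih]
      | some v =>
        simp only [List.foldl, ih, PySem.Set.mem_add, List.mem_cons]
        constructor
        · rintro (⟨h | rfl⟩ | h)
          · exact Or.inl h
          · exact Or.inr (Or.inl rfl)
          · exact Or.inr (Or.inr h)
        · rintro (h | h | h)
          · exact Or.inl (Or.inl h)
          · exact Or.inl (Or.inr (by injection h))
          · exact Or.inr h
  rw [PySem.Set.equal_iff]
  constructor
  · intro h o ho
    cases o with
    | none => exact Or.inl rfl
    | some v =>
      right
      have := (h v).mp ((hmem l _ v).mpr (Or.inr ho))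
      simp [PySem.Set.mem_ofList] at this
      exact congrArg some this
  · intro h x
    rw [hmem]
    simp only [PySem.Set.mem_ofList, List.mem_singleton]
    constructor
    · rintro (h' | h')
      · exact h'
      · rcases h _ h' with h'' | h''
        · exact absurd h'' (by simp)
        · exact Option.some.inj h''
    · intro h'; exact Or.inl h'

-- ===== VERDICT =====
theorem determiner_statut_fluide_global_spec : Claim_equal_determiner_statut_fluide_global := by
  intro e g c f _
  unfold Spec_determiner_statut_fluide_global determiner_statut_fluide_global determiner_statut_fluide_global_alt
  have hset := pvSetEq_iff e [g, c, f]
  by_cases h1 : e = "COMPLET" <;> by_cases h2 : e = "DEBUT EXP" <;> by_cases h3 : e = "FIN EXP" <;>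
    simp_all
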